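-- pv_equiv track=rewrite | github.com/swisskanton/javascript | coin_co_operation.py | get_coin_balances
-- ===== SOURCE A (Python) =====
-- def get_coin_balances(lst1, lst2):
--     x, y = 3, 3
--     for i in range(len(lst1)):
--         if lst1[i] == lst2[i]:
--             if lst1[i] == 'share':
--                 x += 2
--                 y += 2
--         elif lst1[i] == 'share':
--             x -= 1
--             y += 3
--         else:
--             x += 3
--             y -= 1
--     return (x, y)
-- ===== SOURCE B (Python) =====
-- def get_coin_balances(lst1, lst2):
--     n = len(lst1)
--     a = sum(1 for i in range(n) if lst1[i] == lst2[i] == 'share')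
--     b = sum(1 for i in range(n) if lst1[i] != lst2[i] and lst1[i] == 'share')
--     c = sum(1 for i in range(n) if lst1[i] != lst2[i] and lst1[i] != 'share')
--     return (3 + 2 * a - b + 3 * c, 3 + 2 * a + 3 * b - c)
-- ===== Notes on version B (the rewrite author's own statement) =====
-- stated objective: alternative
-- what changed: Replaces A's stateful pair-updating loop with three independent counts of pair categories (both-share, unequal-with-share, unequal-without-share) combined by the closed form (3+2a-b+3c, 3+2a+3b-c).
import Mathlib
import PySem

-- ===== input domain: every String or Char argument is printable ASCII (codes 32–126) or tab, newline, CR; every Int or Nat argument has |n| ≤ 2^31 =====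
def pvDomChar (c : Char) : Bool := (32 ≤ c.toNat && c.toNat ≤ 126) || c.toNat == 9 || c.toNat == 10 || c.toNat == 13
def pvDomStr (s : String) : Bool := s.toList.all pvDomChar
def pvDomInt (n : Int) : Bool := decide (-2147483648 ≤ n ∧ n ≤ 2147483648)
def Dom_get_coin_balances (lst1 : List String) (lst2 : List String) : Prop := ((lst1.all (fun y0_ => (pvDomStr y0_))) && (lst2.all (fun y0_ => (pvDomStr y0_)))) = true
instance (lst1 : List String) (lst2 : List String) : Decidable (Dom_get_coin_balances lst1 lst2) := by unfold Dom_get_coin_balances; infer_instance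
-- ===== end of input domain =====

-- B replaces A's stateful pair-updating loop with three category counts combined by a closed form (alternative decomposition, same cost).


-- ===== PORT A =====
-- Literal port of A: one loop over range(len(lst1)) updating (x, y).
-- Indexing uses pyGetD; under Pre_ (len lst1 ≤ len lst2) every index is in range, so the default is never read.
def get_coin_balances (lst1 : List String) (lst2 : List String) : Int × Int :=
  (PySem.List.pyRange 0 (PySem.List.len lst1) 1).foldl
    (fun (st : Int × Int) i =>
      if PySem.List.pyGetD lst1 i "" = PySem.List.pyGetD lst2 i "" then
        if PySem.List.pyGetD lst1 i "" = "share" then (st.1 + 2, st.2 + 2) else st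
      else if PySem.List.pyGetD lst1 i "" = "share" then (st.1 - 1, st.2 + 3)
      else (st.1 + 3, st.2 - 1))
    (3, 3)

-- ===== PORT B =====
-- Port of Source B: three generator-sum counts over range(len(lst1)), then the closed form.
def get_coin_balances_alt (lst1 : List String) (lst2 : List String) : Int × Int :=
  let n := PySem.List.len lst1
  let a : Int := ((PySem.List.pyRange 0 n 1).map (fun i =>
    if PySem.List.pyGetD lst1 i "" = PySem.List.pyGetD lst2 i "" ∧ PySem.List.pyGetD lst2 i "" = "share" then (1 : Int) else 0)).sum
  let b : Int := ((PySem.List.pyRange 0 n 1).map (fun i =>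
    if PySem.List.pyGetD lst1 i "" ≠ PySem.List.pyGetD lst2 i "" ∧ PySem.List.pyGetD lst1 i "" = "share" then (1 : Int) else 0)).sum
  let c : Int := ((PySem.List.pyRange 0 n 1).map (fun i =>
    if PySem.List.pyGetD lst1 i "" ≠ PySem.List.pyGetD lst2 i "" ∧ PySem.List.pyGetD lst1 i "" ≠ "share" then (1 : Int) else 0)).sum
  (3 + 2 * a - b + 3 * c, 3 + 2 * a + 3 * b - c)

-- ===== PRECONDITION & SPEC =====
-- Pre_ excludes exactly the inputs where A (and B alike) raises IndexError: lst2 shorter than lst1.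
def Pre_get_coin_balances (lst1 : List String) (lst2 : List String) : Prop := lst1.length ≤ lst2.length
instance (lst1 : List String) (lst2 : List String) : Decidable (Pre_get_coin_balances lst1 lst2) := by unfold Pre_get_coin_balances; infer_instance
def pvWitness_get_coin_balances : List String × List String := (["share", "steal"], ["share", "share"])
def Spec_get_coin_balances (lst1 : List String) (lst2 : List String) (out : Int × Int) : Prop := out = get_coin_balances_alt lst1 lst2
instance (lst1 : List String) (lst2 : List String) (out : Int × Int) : Decidable (Spec_get_coin_balances lst1 lst2 out) := by unfold Spec_get_coin_balances; infer_instance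

-- ===== CLAIM (what is proved, stated in full; the proofs are below) =====
def Claim_equal_get_coin_balances : Prop := ∀ (lst1 : List String) (lst2 : List String), Dom_get_coin_balances lst1 lst2 → Pre_get_coin_balances lst1 lst2 → Spec_get_coin_balances lst1 lst2 (get_coin_balances lst1 lst2)

-- ===== LEMMAS AND PROOFS =====
-- Loop invariant: over any index list l, A's fold from (x, y) equals (x, y) shifted by B's three counts over l.
lemma loop_eq (lst1 lst2 : List String) (l : List Int) (x y : Int) :
    l.foldl
      (fun (st : Int × Int) i =>
        if PySem.List.pyGetD lst1 i "" = PySem.List.pyGetD lst2 i "" then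
          if PySem.List.pyGetD lst1 i "" = "share" then (st.1 + 2, st.2 + 2) else st
        else if PySem.List.pyGetD lst1 i "" = "share" then (st.1 - 1, st.2 + 3)
        else (st.1 + 3, st.2 - 1))
      (x, y)
    =
    (x + 2 * ((l.map (fun i =>
        if PySem.List.pyGetD lst1 i "" = PySem.List.pyGetD lst2 i "" ∧ PySem.List.pyGetD lst2 i "" = "share" then (1 : Int) else 0)).sum)
       - ((l.map (fun i =>
        if PySem.List.pyGetD lst1 i "" ≠ PySem.List.pyGetD lst2 i "" ∧ PySem.List.pyGetD lst1 i "" = "share" then (1 : Int) else 0)).sum)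
       + 3 * ((l.map (fun i =>
        if PySem.List.pyGetD lst1 i "" ≠ PySem.List.pyGetD lst2 i "" ∧ PySem.List.pyGetD lst1 i "" ≠ "share" then (1 : Int) else 0)).sum),
     y + 2 * ((l.map (fun i =>
        if PySem.List.pyGetD lst1 i "" = PySem.List.pyGetD lst2 i "" ∧ PySem.List.pyGetD lst2 i "" = "share" then (1 : Int) else 0)).sum)
       + 3 * ((l.map (fun i =>
        if PySem.List.pyGetD lst1 i "" ≠ PySem.List.pyGetD lst2 i "" ∧ PySem.List.pyGetD lst1 i "" = "share" then (1 : Int) else 0)).sum)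
       - ((l.map (fun i =>
        if PySem.List.pyGetD lst1 i "" ≠ PySem.List.pyGetD lst2 i "" ∧ PySem.List.pyGetD lst1 i "" ≠ "share" then (1 : Int) else 0)).sum)) := by
  induction l generalizing x y with
  | nil => simp
  | cons hd tl ih =>
    by_cases h1 : PySem.List.pyGetD lst1 hd "" = PySem.List.pyGetD lst2 hd ""
    · by_cases h2 : PySem.List.pyGetD lst1 hd "" = "share"
      · simp [h1, h1 ▸ h2, ih]; constructor <;> ring
      · simp [h1, h1 ▸ h2, ih]
    · by_cases h2 : PySem.List.pyGetD lst1 hd "" = "share"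
      · have h1' : ("share" : String) ≠ PySem.List.pyGetD lst2 hd "" := h2 ▸ h1
        simp [h1', h2, ih]; constructor <;> ring
      · simp [h1, h2, ih]; constructor <;> ring

-- ===== VERDICT (by name: the statement is the Claim_ definition above) =====
theorem get_coin_balances_spec : Claim_equal_get_coin_balances := by
  intro lst1 lst2 _ _
  unfold Spec_get_coin_balances get_coin_balances get_coin_balances_alt
  rw [loop_eq]
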